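-- pv_equiv track=rewrite | github.com/pengyuanzhi/AI-DevOps | src/core/analyzers/project_detector.py | get_include_paths
-- ===== SOURCE A (Python) =====
-- from typing import List, Optional
--
-- def get_include_paths(source_files: List[str]) -> List[str]:
--     """从源文件列表推断 include 路径.
--
--     Args:
--         source_files: 源文件列表
--
--     Returns:
--         可能的 include 路径列表
--     """
--     include_paths = set()
--
--     for file_path in source_files:
--         # 提取目录路径
--         parts = file_path.split("/")
--         if len(parts) > 1:
--             # 添加各级目录
--             for i in range(1, len(parts)):
--                 include_paths.add("/".join(parts[:i]))
--
--     return sorted(include_paths)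
-- ===== SOURCE B (Python) =====
-- from typing import List
--
-- def get_include_paths(source_files: List[str]) -> List[str]:
--     """Same result as A: a prefix of a path up to (excluding) each '/' occurrence
--     is exactly '/'.join of the parts before it, so one character scan suffices."""
--     include_paths = set()
--     for file_path in source_files:
--         for i, ch in enumerate(file_path):
--             if ch == "/":
--                 include_paths.add(file_path[:i])
--     return sorted(include_paths)
-- ===== Notes on version B (the rewrite author's own statement) =====
-- stated objective: alternative
-- what changed: Instead of splitting each path into parts and joining every prefix slice parts[:i], B makes a single character scan per path and adds file_path[:i] at each '/' occurrence, with no split/join at all.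
import Mathlib
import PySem

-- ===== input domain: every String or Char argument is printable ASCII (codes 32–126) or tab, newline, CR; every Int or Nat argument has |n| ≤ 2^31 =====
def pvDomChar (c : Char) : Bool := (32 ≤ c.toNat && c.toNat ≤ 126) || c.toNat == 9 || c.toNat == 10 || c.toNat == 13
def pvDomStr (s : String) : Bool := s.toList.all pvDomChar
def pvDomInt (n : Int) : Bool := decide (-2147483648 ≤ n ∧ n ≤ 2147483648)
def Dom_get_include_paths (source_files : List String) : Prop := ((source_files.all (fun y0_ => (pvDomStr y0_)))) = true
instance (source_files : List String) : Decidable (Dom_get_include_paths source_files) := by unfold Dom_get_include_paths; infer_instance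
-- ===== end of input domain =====

-- B replaces A's split-into-parts + join-of-every-prefix-slice by a single character
-- scan per path that adds file_path[:i] at each '/' occurrence (objective: alternative).

-- ===== PORT A =====
def get_include_paths (source_files : List String) : List String :=
  let include_paths : PySem.Set String :=
    source_files.foldl (fun acc file_path =>
      let parts := (PySem.Str.split? file_path "/").getD []
      if parts.length > 1 then
        (PySem.List.pyRange 1 (parts.length : Int) 1).foldl
          (fun acc2 i =>
            PySem.Set.add acc2 (PySem.Str.join "/" (PySem.List.slice parts none (some i)))) acc
      else acc) PySem.Set.empty
  PySem.List.sorted include_paths (fun x => x) false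

-- ===== PORT B =====
def get_include_paths_alt (source_files : List String) : List String :=
  let include_paths : PySem.Set String :=
    source_files.foldl (fun acc file_path =>
      (PySem.List.enumerate file_path.toList).foldl
        (fun acc2 p =>
          if p.2 = '/' then PySem.Set.add acc2 (PySem.Str.slice file_path none (some p.1))
          else acc2) acc) PySem.Set.empty
  PySem.List.sorted include_paths (fun x => x) false

-- ===== PRECONDITION & SPEC =====
def Spec_get_include_paths (source_files : List String) (out : List String) : Prop := out = get_include_paths_alt source_files
instance (source_files : List String) (out : List String) : Decidable (Spec_get_include_paths source_files out) := by unfold Spec_get_include_paths; infer_instance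

-- ===== CLAIM (what is proved, stated in full; the proofs are below) =====
def Claim_equal_get_include_paths : Prop := ∀ (source_files : List String), Dom_get_include_paths source_files → Spec_get_include_paths source_files (get_include_paths source_files)

-- ===== LEMMAS AND PROOFS =====

-- a direct structural recursion computing Python's s.split("/") on char lists
def mySplit : List Char → List Char → List (List Char)
  | [], pre => [pre]
  | c :: rest, pre => if c = '/' then pre :: mySplit rest [] else mySplit rest (pre ++ [c])

-- the prefixes of cs ending just before each '/' occurrence, in order
def pref : List Char → List (List Char)
  | [] => []
  | c :: rest => if c = '/' then [] :: (pref rest).map (c :: ·) else (pref rest).map (c :: ·)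

theorem go_eq (fuel : Nat) (l cur : List Char) (acc : List (List Char))
    (h : l.length ≤ fuel) :
    PySem.Chars.splitOn.go ['/'] fuel l cur acc = acc.reverse ++ mySplit l cur.reverse := by
  induction fuel generalizing l cur acc with
  | zero =>
    have hl : l = [] := by cases l <;> simp_all
    subst hl
    rw [PySem.Chars.splitOn.go.eq_def]
    simp [mySplit]
  | succ f ih =>
    cases l with
    | nil =>
      rw [PySem.Chars.splitOn.go.eq_def]
      simp [mySplit]
    | cons c rest =>
      rw [PySem.Chars.splitOn.go.eq_def]
      by_cases hc : c = '/'
      · subst hc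
        have hp : (['/'].isPrefixOf ('/' :: rest)) = true := by simp [List.isPrefixOf]
        simp only [hp, if_pos]
        have hd : List.drop (['/'] : List Char).length ('/' :: rest) = rest := rfl
        rw [hd, ih rest [] (cur.reverse :: acc) (by simpa using Nat.le_of_succ_le_succ h)]
        simp [mySplit]
      · have hp : (['/'].isPrefixOf (c :: rest)) = false := by
          simp [List.isPrefixOf]; exact fun hh => (hc hh.symm).elim
        simp only [hp, Bool.false_eq_true, if_false]
        rw [ih rest (c :: cur) acc (by simpa using Nat.le_of_succ_le_succ h)]
        simp [mySplit, hc]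

theorem splitOn_eq (cs : List Char) :
    PySem.Chars.splitOn cs ['/'] = mySplit cs [] := by
  unfold PySem.Chars.splitOn
  rw [go_eq cs.length.succ cs [] [] (Nat.le_succ _)]
  simp

theorem mySplit_ne_nil (cs pre : List Char) : mySplit cs pre ≠ [] := by
  induction cs generalizing pre with
  | nil => simp [mySplit]
  | cons c rest ih =>
    by_cases hc : c = '/' <;> simp [mySplit, hc, ih]

theorem mySplit_modifyHead (cs pre : List Char) :
    mySplit cs pre = (mySplit cs []).modifyHead (pre ++ ·) := by
  induction cs generalizing pre with
  | nil => simp [mySplit]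
  | cons c rest ih =>
    by_cases hc : c = '/'
    · simp [mySplit, hc]
    · simp only [mySplit, hc, if_false]
      rw [ih (pre ++ [c]), show ([] : List Char) ++ [c] = [c] from rfl, ih [c]]
      cases hS : mySplit rest [] with
      | nil => exact absurd hS (mySplit_ne_nil rest [])
      | cons h t => simp

theorem join_cons_head (c : Char) (p : List Char) (rest : List (List Char)) :
    PySem.Chars.join ['/'] ((c :: p) :: rest) = c :: PySem.Chars.join ['/'] (p :: rest) := by
  cases rest with
  | nil => simp [PySem.Chars.join_singleton]
  | cons q r => rw [PySem.Chars.join_cons_cons, PySem.Chars.join_cons_cons]; simp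

theorem main_lemma (cs : List Char) :
    (List.range ((mySplit cs []).length - 1)).map
      (fun k => PySem.Chars.join ['/'] ((mySplit cs []).take (k + 1))) = pref cs := by
  induction cs with
  | nil => simp [mySplit, pref]
  | cons c rest ih =>
    obtain ⟨s0, stl, hS⟩ : ∃ s0 stl, mySplit rest [] = s0 :: stl := by
      cases h : mySplit rest [] with
      | nil => exact absurd h (mySplit_ne_nil rest [])
      | cons a b => exact ⟨a, b, rfl⟩
    rw [hS] at ih
    simp only [List.length_cons, Nat.add_sub_cancel] at ih
    by_cases hc : c = '/'
    · subst hc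
      simp only [mySplit, pref, hS, reduceIte]
      rw [List.length_cons, List.length_cons, Nat.add_sub_cancel, List.range_succ_eq_map]
      simp only [List.map_cons, List.map_map]
      refine congrArg₂ _ ?_ ?_
      · simp [PySem.Chars.join_singleton]
      · rw [← ih, List.map_map]
        refine List.map_congr_left ?_
        intro k _
        show PySem.Chars.join ['/'] (([] :: s0 :: stl).take (k + 1 + 1)) =
          '/' :: PySem.Chars.join ['/'] ((s0 :: stl).take (k + 1))
        rw [List.take_succ_cons, List.take_succ_cons, PySem.Chars.join_cons_cons]
        simp
    · have hstep : mySplit (c :: rest) [] = (c :: s0) :: stl := by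
        simp only [mySplit]
        rw [if_neg hc, show ([] : List Char) ++ [c] = [c] from rfl, mySplit_modifyHead rest [c], hS]
        rfl
      simp only [hstep, pref, List.length_cons, Nat.add_sub_cancel]
      rw [if_neg hc]
      rw [← ih, List.map_map]
      refine List.map_congr_left ?_
      intro k _
      show PySem.Chars.join ['/'] (((c :: s0) :: stl).take (k + 1)) =
        c :: PySem.Chars.join ['/'] ((s0 :: stl).take (k + 1))
      rw [List.take_succ_cons, List.take_succ_cons, join_cons_head]

theorem pyRange_one (n : Nat) :
    PySem.List.pyRange 1 (n : Int) 1 = (List.range (n - 1)).map (fun (k : Nat) => 1 + (k : Int)) := by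
  unfold PySem.List.pyRange
  have hc : (if (1 : Int) < (n : Int) then (((n : Int) - 1 + 1 - 1) / 1).toNat else 0) = n - 1 := by
    split_ifs with h
    · rw [Int.ediv_one]; omega
    · omega
  simp only [one_ne_zero, if_false, zero_lt_one, if_true, hc, one_mul]

theorem B_fold (full : List Char) (cs done : List Char) (hfull : done ++ cs = full)
    (acc : PySem.Set String) :
    (PySem.List.enumerate cs (done.length : Int)).foldl
      (fun a p => if p.2 = '/' then
          PySem.Set.add a (String.ofList (PySem.Chars.slice full none (some p.1))) else a) acc
    = List.foldl PySem.Set.add acc ((pref cs).map (fun p => String.ofList (done ++ p))) := by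
  induction cs generalizing done acc with
  | nil => simp [PySem.List.enumerate, pref]
  | cons c rest ih =>
    have hlen : (done.length : Int) + 1 = ((done ++ [c]).length : Int) := by
      simp
    have hfull' : (done ++ [c]) ++ rest = full := by simpa using hfull
    have htake : PySem.Chars.slice full none (some (done.length : Int)) = done := by
      rw [PySem.Chars.slice_eq_listSlice, PySem.List.slice_to_natCast, ← hfull, List.take_left]
    by_cases hc : c = '/'
    · subst hc
      simp only [PySem.List.enumerate, List.foldl_cons, htake, pref, reduceIte,
        List.map_cons, hlen]
      rw [ih (done ++ ['/']) hfull' _]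
      congr 1
      · simp
      · rw [List.map_map]
        refine List.map_congr_left fun p _ => ?_
        simp [Function.comp]
    · simp only [PySem.List.enumerate, List.foldl_cons, if_neg hc, pref, hlen]
      rw [ih (done ++ [c]) hfull' _, List.map_map]
      refine congrArg _ (List.map_congr_left fun p _ => ?_)
      simp [Function.comp]

theorem inner_eq (acc : PySem.Set String) (s : String) :
    (let parts := (PySem.Str.split? s "/").getD []
     if parts.length > 1 then
       (PySem.List.pyRange 1 (parts.length : Int) 1).foldl
         (fun acc2 i =>
           PySem.Set.add acc2 (PySem.Str.join "/" (PySem.List.slice parts none (some i)))) acc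
     else acc)
    = (PySem.List.enumerate s.toList).foldl
        (fun acc2 p =>
          if p.2 = '/' then PySem.Set.add acc2 (PySem.Str.slice s none (some p.1))
          else acc2) acc := by
  have hparts : (PySem.Str.split? s "/").getD [] = (mySplit s.toList []).map String.ofList := by
    have hsep : ("/" : String).toList = ['/'] := rfl
    simp [PySem.Str.split?, PySem.Chars.split?, hsep, splitOn_eq]
  have hB := B_fold s.toList s.toList [] rfl acc
  simp only [List.length_nil, Nat.cast_zero, List.nil_append] at hB
  have hgoalB : (PySem.List.enumerate s.toList).foldl
        (fun acc2 p =>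
          if p.2 = '/' then PySem.Set.add acc2 (PySem.Str.slice s none (some p.1))
          else acc2) acc
      = List.foldl PySem.Set.add acc ((pref s.toList).map String.ofList) := by
    rw [← hB]; rfl
  rw [hgoalB]
  simp only [hparts, List.length_map]
  by_cases hn : (mySplit s.toList []).length > 1
  · rw [if_pos hn, pyRange_one, List.foldl_map]
    have hval : ∀ acc2 : PySem.Set String, ∀ k ∈ List.range ((mySplit s.toList []).length - 1),
        PySem.Set.add acc2 (PySem.Str.join "/"
          (PySem.List.slice ((mySplit s.toList []).map String.ofList) none (some (1 + (k : Int)))))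
        = PySem.Set.add acc2 (String.ofList (PySem.Chars.join ['/'] ((mySplit s.toList []).take (k + 1)))) := by
      intro acc2 k _
      have h1 : (1 + (k : Int)) = ((k + 1 : Nat) : Int) := by push_cast; ring
      rw [h1, PySem.List.slice_to_natCast, ← List.map_take]
      simp [PySem.Str.join, List.map_map, Function.comp_def]
    rw [PySem.List.foldl_congr_mem _ _ _ _ hval,
      show List.foldl (fun acc2 k => PySem.Set.add acc2
          (String.ofList (PySem.Chars.join ['/'] ((mySplit s.toList []).take (k + 1))))) acc
          (List.range ((mySplit s.toList []).length - 1))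
        = List.foldl PySem.Set.add acc
            ((List.range ((mySplit s.toList []).length - 1)).map
              (fun k => String.ofList (PySem.Chars.join ['/'] ((mySplit s.toList []).take (k + 1)))))
        from List.foldl_map.symm]
    rw [show ((List.range ((mySplit s.toList []).length - 1)).map
          (fun k => String.ofList (PySem.Chars.join ['/'] ((mySplit s.toList []).take (k + 1)))))
        = (pref s.toList).map String.ofList from by rw [← main_lemma s.toList, List.map_map]; rfl]
  · rw [if_neg hn]
    have hn1 : (mySplit s.toList []).length = 1 := by
      have h0 : (mySplit s.toList []).length ≠ 0 := by
        simpa [List.length_eq_zero_iff] using mySplit_ne_nil s.toList []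
      omega
    have hpref : pref s.toList = [] := by
      rw [← main_lemma s.toList, hn1]; rfl
    rw [hpref]; rfl

-- ===== VERDICT (by name: the statement is the Claim_ definition above) =====
theorem get_include_paths_spec : Claim_equal_get_include_paths := by
  intro source_files _
  unfold Spec_get_include_paths get_include_paths get_include_paths_alt
  have h := PySem.List.foldl_congr_mem source_files _ _ (PySem.Set.empty (α := String))
    (fun acc x _ => inner_eq acc x)
  simp only [h]
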